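-- pv_equiv track=rewrite | github.com/asmit404/GFG_Solutions | Array Operations.py | arrayOperations
-- ===== SOURCE A (Python) =====
-- from typing import List
--
-- def arrayOperations(n: int, arr: List[int]) -> int:
--     if 0 not in arr:
--         return -1
--     c = 0
--     for i in range(1, len(arr)):
--         if arr[i-1] != 0 and arr[i] == 0:
--             c += 1
--     if arr[-1] != 0:
--         c += 1
--     return c
-- ===== SOURCE B (Python) =====
-- def arrayOperations(n, arr):
--     if 0 not in arr:
--         return -1
--     nonzeros = sum(1 for x in arr if x != 0)
--     both_nonzero_pairs = sum(1 for a, b in zip(arr, arr[1:]) if a != 0 and b != 0)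
--     return nonzeros - both_nonzero_pairs
-- ===== Notes on version B (the rewrite author's own statement) =====
-- stated objective: alternative
-- what changed: Replaces A's boundary detection (pairwise nonzero->zero transition count plus an arr[-1]!=0 endpoint fixup) with an inclusion-exclusion counting identity: the answer equals the number of nonzero elements minus the number of adjacent pairs that are both nonzero, computed as two staged counts with no boundary logic.
import Mathlib
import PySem

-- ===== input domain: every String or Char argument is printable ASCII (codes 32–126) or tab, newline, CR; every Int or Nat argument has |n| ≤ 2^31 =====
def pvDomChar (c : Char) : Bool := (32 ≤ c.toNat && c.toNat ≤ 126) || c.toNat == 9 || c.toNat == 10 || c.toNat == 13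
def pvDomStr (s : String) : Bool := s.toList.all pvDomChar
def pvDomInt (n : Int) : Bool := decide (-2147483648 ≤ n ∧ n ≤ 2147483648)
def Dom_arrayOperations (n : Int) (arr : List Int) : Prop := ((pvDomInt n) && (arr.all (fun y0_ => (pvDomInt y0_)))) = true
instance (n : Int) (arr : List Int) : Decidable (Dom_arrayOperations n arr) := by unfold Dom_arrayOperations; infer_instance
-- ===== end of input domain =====

-- B computes the run count by an inclusion-exclusion identity (#nonzero elements
-- minus #adjacent both-nonzero pairs) instead of A's transition detection + endpoint fixup
-- (objective: alternative).

-- ===== PORT A =====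
def arrayOperations (n : Int) (arr : List Int) : Int :=
  if (0 : Int) ∉ arr then -1
  else
    let c : Int := (PySem.List.pyRange 1 (arr.length : Int) 1).foldl
      (fun c i =>
        if PySem.List.pyGetD arr (i - 1) 0 ≠ 0 ∧ PySem.List.pyGetD arr i 0 = 0 then c + 1 else c) 0
    if PySem.List.pyGetD arr (-1) 0 ≠ 0 then c + 1 else c

-- ===== PORT B =====
def arrayOperations_alt (n : Int) (arr : List Int) : Int :=
  if (0 : Int) ∉ arr then -1
  else
    let nonzeros : Int := ((arr.filter (fun x => x ≠ 0)).length : Int)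
    let pairs : Int := (((arr.zip arr.tail).filter (fun p => p.1 ≠ 0 ∧ p.2 ≠ 0)).length : Int)
    nonzeros - pairs

-- ===== PRECONDITION & SPEC =====
def Spec_arrayOperations (n : Int) (arr : List Int) (out : Int) : Prop := out = arrayOperations_alt n arr
instance (n : Int) (arr : List Int) (out : Int) : Decidable (Spec_arrayOperations n arr out) := by unfold Spec_arrayOperations; infer_instance

-- ===== CLAIM (what is proved, stated in full; the proofs are below) =====
def Claim_equal_arrayOperations : Prop := ∀ (n : Int) (arr : List Int), Dom_arrayOperations n arr → Spec_arrayOperations n arr (arrayOperations n arr)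

-- ===== LEMMAS AND PROOFS =====

-- number of nonzero→zero adjacent transitions (A's loop, restated structurally)
def pvTrans : List Int → Int
  | a :: b :: t => (if a ≠ 0 ∧ b = 0 then 1 else 0) + pvTrans (b :: t)
  | _ => 0

theorem pvAux_range (xs : List Int) : ∀ (c0 : Int),
    (List.range (xs.length - 1)).foldl
      (fun c k => if xs.getD k 0 ≠ 0 ∧ xs.getD (k + 1) 0 = 0 then c + 1 else c) c0
    = c0 + pvTrans xs := by
  induction xs with
  | nil => intro c0; simp [pvTrans]
  | cons a ys ih =>
    intro c0
    cases ys with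
    | nil => simp [pvTrans]
    | cons b t =>
      have hlen : (a :: b :: t).length - 1 = (b :: t).length := by simp
      rw [hlen]
      show (List.range ((b :: t).length - 1 + 1)).foldl _ c0 = _
      rw [List.range_succ_eq_map, List.foldl_cons, List.foldl_map]
      simp only [List.getD_cons_zero, List.getD_cons_succ]
      have ih' := ih (if a ≠ 0 ∧ b = 0 then c0 + 1 else c0)
      simp only [List.getD_cons_succ] at ih'
      rw [ih']
      simp only [pvTrans]
      split_ifs <;> ring

theorem pvLoop_eq (xs : List Int) (c0 : Int) :
    (PySem.List.pyRange 1 (xs.length : Int) 1).foldl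
      (fun c i =>
        if PySem.List.pyGetD xs (i - 1) 0 ≠ 0 ∧ PySem.List.pyGetD xs i 0 = 0 then c + 1 else c) c0
    = c0 + pvTrans xs := by
  rw [PySem.List.pyRange_one, List.foldl_map]
  have h1 : ((xs.length : Int) - 1).toNat = xs.length - 1 := by omega
  rw [h1]
  have heq : (fun (c : Int) (k : Nat) =>
      if PySem.List.pyGetD xs (1 + (k : Int) - 1) 0 ≠ 0 ∧ PySem.List.pyGetD xs (1 + (k : Int)) 0 = 0 then c + 1 else c)
      = (fun (c : Int) (k : Nat) => if xs.getD k 0 ≠ 0 ∧ xs.getD (k + 1) 0 = 0 then c + 1 else c) := by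
    funext c k
    have e1 : (1 : Int) + (k : Int) - 1 = ((k : Nat) : Int) := by omega
    have e2 : (1 : Int) + (k : Int) = (((k + 1 : Nat)) : Int) := by push_cast; omega
    rw [e1, e2, PySem.List.pyGetD_natCast, PySem.List.pyGetD_natCast]
  rw [heq, pvAux_range xs c0]

-- inclusion-exclusion core: transitions + endpoint fixup = nonzeros - both-nonzero pairs
theorem pvIncl_excl (xs : List Int) : ∀ (a : Int),
    pvTrans (a :: xs) + (if PySem.List.pyGetD (a :: xs) (-1) 0 ≠ 0 then 1 else 0)
    = (((a :: xs).filter (fun x => x ≠ 0)).length : Int)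
      - ((((a :: xs).zip (a :: xs).tail).filter (fun p => p.1 ≠ 0 ∧ p.2 ≠ 0)).length : Int) := by
  induction xs with
  | nil =>
    intro a
    by_cases ha : a = 0 <;>
      simp [pvTrans, ha, PySem.List.pyGetD, PySem.List.pyGet?, PySem.List.pyIdx?, List.filter]
  | cons b t ih =>
    intro a
    have hlast : PySem.List.pyGetD (a :: b :: t) (-1) 0 = PySem.List.pyGetD (b :: t) (-1) 0 := by
      rw [PySem.List.pyGetD_neg_one (a :: b :: t) 0 (by simp),
          PySem.List.pyGetD_neg_one (b :: t) 0 (by simp)]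
      exact List.getLast_cons _
    rw [show pvTrans (a :: b :: t) = (if a ≠ 0 ∧ b = 0 then 1 else 0) + pvTrans (b :: t) from rfl,
        hlast]
    have := ih b
    simp only [List.tail_cons, List.zip_cons_cons, List.filter] at this ⊢
    by_cases ha : a = 0 <;> by_cases hb : b = 0 <;>
      · simp [ha, hb] at this ⊢
        omega

-- ===== VERDICT (by name: the statement is the Claim_ definition above) =====
theorem arrayOperations_spec : Claim_equal_arrayOperations := by
  intro n arr _
  unfold Spec_arrayOperations arrayOperations arrayOperations_alt
  by_cases h0 : (0 : Int) ∈ arr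
  · rw [if_neg (not_not_intro h0), if_neg (not_not_intro h0)]
    cases arr with
    | nil => simp at h0
    | cons a xs =>
      rw [pvLoop_eq (a :: xs) 0, zero_add]
      have h := pvIncl_excl xs a
      by_cases hl : PySem.List.pyGetD (a :: xs) (-1) 0 = 0
      · simp [hl] at h ⊢; omega
      · simp [hl] at h ⊢; omega
  · simp [h0]
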